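-- pv_equiv track=rewrite | github.com/pymongo/python_leetcode | two_sum_two_pointers/intersection_of_two_arrays.py | intersection_k_arrays
-- ===== SOURCE A (Python) =====
-- from typing import List
--
-- def intersection_k_arrays(arrs: List[List[int]]) -> int:
--     k = len(arrs)
--     m = dict()
--     for i in range(k):
--         for num in arrs[i]:
--             m[num] = m.get(num, 0) + 1
--
--     res = 0
--     for count in m.values():
--         # 由于本题入参中没有重复，所以出现k次的数字一定是在每个数组中各出现一次
--         if count == k:
--             res += 1
--     return res
-- ===== SOURCE B (Python) =====
-- from typing import List
--
-- def intersection_k_arrays(arrs: List[List[int]]) -> int: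
--     k = len(arrs)
--     flat = []
--     for a in arrs:
--         flat.extend(a)
--     flat.sort()
--     res = 0
--     run = 0
--     prev = None
--     for x in flat:
--         if run > 0 and x == prev:
--             run += 1
--         else:
--             if run == k:
--                 res += 1
--             run = 1
--             prev = x
--     if flat and run == k:
--         res += 1
--     return res
-- ===== Notes on version B (the rewrite author's own statement) =====
-- stated objective: alternative
-- what changed: Replaces the dict tally (count every number, then count values equal to k) by flatten + sort followed by a single run-length scan that counts maximal runs of length exactly k.
import Mathlib
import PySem

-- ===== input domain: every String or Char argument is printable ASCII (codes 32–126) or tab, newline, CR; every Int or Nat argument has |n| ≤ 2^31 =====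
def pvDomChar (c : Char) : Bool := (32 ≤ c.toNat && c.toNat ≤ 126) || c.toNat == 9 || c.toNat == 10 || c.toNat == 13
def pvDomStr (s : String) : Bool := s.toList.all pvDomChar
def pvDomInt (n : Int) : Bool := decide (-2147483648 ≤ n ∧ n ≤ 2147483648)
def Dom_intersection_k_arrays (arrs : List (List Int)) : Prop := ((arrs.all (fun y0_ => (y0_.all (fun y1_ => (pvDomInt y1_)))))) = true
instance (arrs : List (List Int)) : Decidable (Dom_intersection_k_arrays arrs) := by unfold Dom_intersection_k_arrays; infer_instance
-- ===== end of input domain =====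

-- B replaces A's dict tally by flatten + sort followed by a single run-length scan counting maximal runs of length exactly k (alternative algorithm, no speed claim).


-- ===== PORT A =====
def intersection_k_arrays (arrs : List (List Int)) : Int :=
  let k : Int := arrs.length
  let m : PySem.Dict Int Int :=
    (PySem.List.pyRange 0 k 1).foldl
      (fun m i =>
        (PySem.List.pyGetD arrs i []).foldl
          (fun m num => m.insert num (m.getD num 0 + 1)) m)
      PySem.Dict.empty
  m.values.foldl (fun res count => if count == k then res + 1 else res) 0

-- ===== PORT B =====
-- one loop step of Source B's run-length scan: state = (res, run, prev)
def pvStepB (k : Int) (st : Int × Int × Option Int) (x : Int) : Int × Int × Option Int :=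
  if 0 < st.2.1 ∧ st.2.2 = some x then (st.1, st.2.1 + 1, st.2.2)
  else ((if st.2.1 == k then st.1 + 1 else st.1), 1, some x)

def intersection_k_arrays_alt (arrs : List (List Int)) : Int :=
  let k : Int := arrs.length
  let flat := arrs.foldl (fun acc a => acc ++ a) ([] : List Int)
  let flatS := PySem.List.sorted flat (fun x => x) false
  let st := flatS.foldl (pvStepB k) ((0 : Int), (0 : Int), (none : Option Int))
  if flatS ≠ [] ∧ st.2.1 == k then st.1 + 1 else st.1

-- ===== PRECONDITION & SPEC =====
def Spec_intersection_k_arrays (arrs : List (List Int)) (out : Int) : Prop := out = intersection_k_arrays_alt arrs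
instance (arrs : List (List Int)) (out : Int) : Decidable (Spec_intersection_k_arrays arrs out) := by unfold Spec_intersection_k_arrays; infer_instance

-- ===== CLAIM (what is proved, stated in full; the proofs are below) =====
def Claim_equal_intersection_k_arrays : Prop := ∀ (arrs : List (List Int)), Dom_intersection_k_arrays arrs → Spec_intersection_k_arrays arrs (intersection_k_arrays arrs)

-- ===== LEMMAS AND PROOFS =====

-- number of distinct values of l occurring exactly k times (the common spec of both programs)
def pvF (k : Int) (l : List Int) : Int :=
  ((PySem.Set.ofList l).countP (fun v => ((l.count v : Int) == k)) : Int)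

theorem pvF_perm (k : Int) {l l' : List Int} (h : l.Perm l') : pvF k l = pvF k l' := by
  unfold pvF
  have hs : (PySem.Set.ofList l).Perm (PySem.Set.ofList l') := by
    rw [List.perm_ext_iff_of_nodup (PySem.Set.nodup_ofList l) (PySem.Set.nodup_ofList l')]
    intro v
    simp [PySem.Set.mem_ofList, h.mem_iff]
  have hp : (fun v => ((l.count v : Int) == k)) = (fun v => ((l'.count v : Int) == k)) := by
    funext v; rw [h.count_eq]
  rw [hp, hs.countP_eq]

theorem pvFoldAddMem (x : Int) (r : List Int) (h : x ∉ r) :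
    ∀ s : List Int, r.foldl PySem.Set.add (x :: s) = x :: r.foldl PySem.Set.add s := by
  induction r with
  | nil => intro s; rfl
  | cons y t ih =>
    intro s
    have hxy : x ≠ y := by intro he; exact h (he ▸ List.mem_cons_self)
    have hxt : x ∉ t := fun hm => h (List.mem_cons_of_mem _ hm)
    have hadd : PySem.Set.add (x :: s) y = x :: PySem.Set.add s y := by
      simp only [PySem.Set.add, PySem.Set.contains, List.contains_eq_mem, List.mem_cons,
        Bool.decide_or, Bool.or_eq_true, decide_eq_true_eq, List.cons_append]
      by_cases hys : y ∈ s
      · rw [if_pos (Or.inr hys), if_pos hys]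
      · rw [if_neg (by rintro (he | he); exacts [hxy he.symm, hys he]), if_neg hys]
    simp only [List.foldl_cons, hadd, ih hxt]

theorem pvAddRepl (x : Int) (s : List Int) (h : x ∈ s) :
    ∀ n : Nat, (List.replicate n x).foldl PySem.Set.add s = s := by
  intro n
  induction n with
  | zero => rfl
  | succ m ih =>
    have : PySem.Set.add s x = s := by simp [PySem.Set.add, PySem.Set.contains, h]
    simp [List.replicate_succ, this, ih]

theorem pvOfListRepl (x : Int) (r : List Int) (hx : x ∉ r) {n : Nat} (hn : 1 ≤ n) :
    PySem.Set.ofList (List.replicate n x ++ r) = x :: PySem.Set.ofList r := by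
  obtain ⟨m, rfl⟩ : ∃ m, n = m + 1 := ⟨n - 1, by omega⟩
  rw [PySem.Set.ofList_eq_foldl, PySem.Set.ofList_eq_foldl, List.foldl_append]
  have h1 : (List.replicate (m + 1) x).foldl PySem.Set.add ([] : List Int) = [x] := by
    rw [List.replicate_succ]
    simp only [List.foldl_cons]
    exact pvAddRepl x [x] (List.mem_singleton.2 rfl) m
  rw [h1]
  exact pvFoldAddMem x r hx []

theorem pvF_split (k : Int) (x : Int) (r : List Int) (hx : x ∉ r) {n : Nat} (hn : 1 ≤ n) :
    pvF k (List.replicate n x ++ r) = (if ((n : Int) == k) then 1 else 0) + pvF k r := by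
  unfold pvF
  rw [pvOfListRepl x r hx hn]
  have hcx : (((List.replicate n x ++ r).count x : Int)) = (n : Int) := by
    rw [List.count_append, List.count_replicate_self, List.count_eq_zero.2 hx]; simp
  have hcr : ∀ v ∈ PySem.Set.ofList r,
      ((((List.replicate n x ++ r).count v : Int) == k) = true) ↔ (((r.count v : Int) == k) = true) := by
    intro v hv
    have hvr : v ∈ r := (PySem.Set.mem_ofList r v).1 hv
    have hvx : x ≠ v := fun he => hx (he ▸ hvr)
    rw [List.count_append, List.count_replicate, if_neg (by simpa using hvx)]
    simp
  rw [List.countP_cons, List.countP_congr hcr, hcx]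
  push_cast
  split <;> ring

-- main loop invariant: scanning a sorted tail s after having read run = n ≥ 1 copies of x
theorem pvMain (k : Int) :
    ∀ (s : List Int) (n : Nat) (res x : Int), 1 ≤ n → (∀ y ∈ s, x ≤ y) → s.Pairwise (· ≤ ·) →
      (if ((s.foldl (pvStepB k) (res, (n : Int), some x)).2.1 == k)
        then (s.foldl (pvStepB k) (res, (n : Int), some x)).1 + 1
        else (s.foldl (pvStepB k) (res, (n : Int), some x)).1)
      = res + pvF k (List.replicate n x ++ s) := by
  intro s
  induction s with
  | nil =>
    intro n res x hn _ _
    have hsp := pvF_split k x [] (List.not_mem_nil) hn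
    simp only [List.append_nil] at hsp
    simp only [List.foldl_nil, List.append_nil, hsp]
    have h0 : pvF k [] = 0 := rfl
    rw [h0]
    split <;> ring
  | cons y t ih =>
    intro n res x hn hge hpw
    have hxy : x ≤ y := hge y List.mem_cons_self
    have hpw' : t.Pairwise (· ≤ ·) := hpw.of_cons
    by_cases hexy : x = y
    · subst hexy
      have hstep : pvStepB k (res, (n : Int), some x) x = (res, (n : Int) + 1, some x) := by
        unfold pvStepB; rw [if_pos ⟨show (0:Int) < (n:Int) by omega, rfl⟩]
      have hge' : ∀ z ∈ t, x ≤ z := fun z hz => List.rel_of_pairwise_cons hpw hz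
      have hih := ih (n + 1) res x (by omega) hge' hpw'
      have hl : List.replicate (n + 1) x ++ t = List.replicate n x ++ (x :: t) := by
        rw [List.replicate_succ', List.append_assoc]; rfl
      rw [List.foldl_cons, hstep]
      rw [hl] at hih
      push_cast at hih
      exact hih
    · have hlt : x < y := lt_of_le_of_ne hxy hexy
      have hstep : pvStepB k (res, (n : Int), some x) y =
          ((if ((n : Int) == k) then res + 1 else res), 1, some y) := by
        unfold pvStepB
        rw [if_neg (by rintro ⟨-, h⟩; exact hexy (Option.some.inj h))]
      have hge' : ∀ z ∈ t, y ≤ z := fun z hz => List.rel_of_pairwise_cons hpw hz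
      have hnotin : x ∉ y :: t := by
        intro hm
        rcases List.mem_cons.1 hm with h | h
        · exact hexy h
        · exact absurd (hge' x h) (not_le.2 hlt)
      have hih := ih 1 (if ((n : Int) == k) then res + 1 else res) y le_rfl hge' hpw'
      simp only [Nat.cast_one, List.replicate_one, List.singleton_append] at hih
      rw [List.foldl_cons, hstep, hih, pvF_split k x (y :: t) hnotin hn]
      split <;> ring

-- the whole scan (including the final run flush) computes pvF on a sorted list
theorem pvScanSorted (k : Int) (s : List Int) (hpw : s.Pairwise (· ≤ ·)) (hk : s ≠ [] → 1 ≤ k) :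
    (if s ≠ [] ∧ ((s.foldl (pvStepB k) ((0 : Int), (0 : Int), (none : Option Int))).2.1 == k)
      then (s.foldl (pvStepB k) ((0 : Int), (0 : Int), (none : Option Int))).1 + 1
      else (s.foldl (pvStepB k) ((0 : Int), (0 : Int), (none : Option Int))).1)
    = pvF k s := by
  cases s with
  | nil => simp [pvF, PySem.Set.ofList]
  | cons z t =>
    have hk1 : 1 ≤ k := hk (by simp)
    have hstep : pvStepB k ((0 : Int), (0 : Int), (none : Option Int)) z
        = ((0 : Int), (1 : Int), some z) := by
      unfold pvStepB
      rw [if_neg (by rintro ⟨h, -⟩; exact absurd (show (0:Int) < 0 from h) (lt_irrefl 0))]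
      rw [if_neg (by intro h; have h0 : (0:Int) = k := (beq_iff_eq).1 h; omega)]
    have hmain := pvMain k t 1 0 z le_rfl
      (fun y hy => List.rel_of_pairwise_cons hpw hy) hpw.of_cons
    simp only [Nat.cast_one, List.replicate_one, List.singleton_append, zero_add] at hmain
    simp only [ne_eq, reduceCtorEq, not_false_eq_true, true_and, List.foldl_cons, hstep]
    exact hmain

-- A computes pvF of the flattened input
theorem pvA_eq (arrs : List (List Int)) :
    intersection_k_arrays arrs = pvF (arrs.length : Int) arrs.flatten := by
  simp only [intersection_k_arrays]
  rw [PySem.List.foldl_pyRange_zero_pyGetD']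
  rw [← List.foldl_flatten]
  rw [PySem.Dict.foldl_insert_getD_add_one_eq_counter]
  rw [PySem.List.foldl_beq_add_one]
  have hv : (PySem.Dict.counter arrs.flatten).values
      = (PySem.Set.ofList arrs.flatten).map (fun v => (arrs.flatten.count v : Int)) := by
    simp only [PySem.Dict.values, PySem.Dict.items_counter, List.map_map]
    rfl
  rw [hv, List.count_eq_countP, List.countP_map]
  unfold pvF
  simp only [zero_add]
  rfl

-- B computes pvF of the flattened input too
theorem pvB_eq (arrs : List (List Int)) :
    intersection_k_arrays_alt arrs = pvF (arrs.length : Int) arrs.flatten := by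
  simp only [intersection_k_arrays_alt]
  rw [PySem.List.foldl_append_eq_flatten]
  simp only [List.nil_append]
  have hk : PySem.List.sorted arrs.flatten (fun x => x) false ≠ [] → (1 : Int) ≤ (arrs.length : Int) := by
    intro h
    have harrs : arrs ≠ [] := by
      intro h0
      apply h
      rw [PySem.List.sorted_eq_nil_iff]
      simp [h0]
    have := List.length_pos_iff.2 harrs
    omega
  rw [pvScanSorted (arrs.length : Int) _
    (by simpa using PySem.List.sorted_pairwise arrs.flatten (fun x => x)) hk]
  exact pvF_perm _ (PySem.List.sorted_perm arrs.flatten (fun x => x) false)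

-- ===== VERDICT (by name: the statement is the Claim_ definition above) =====
theorem intersection_k_arrays_spec : Claim_equal_intersection_k_arrays := by
  intro arrs _
  unfold Spec_intersection_k_arrays
  rw [pvA_eq, pvB_eq]
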